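-- pv_equiv track=rewrite | github.com/Skorpio-X/Kalah | kalah.py | find_target_house
-- ===== SOURCE A (Python) =====
-- def find_target_house(house, seeds):
--     """Find the target house of a choosen house."""
--     player = 0 if house in range(0, 6) else 1
--     opp_store = 6 if player == 1 else 13
--     for _ in range(0, seeds):
--         if house + 1 == opp_store:
--             house = (house+2) % 14
--         else:
--             house = (house+1) % 14
--     return house
-- ===== SOURCE B (Python) =====
-- def find_target_house(house, seeds):
--     """Find the target house of a choosen house."""
--     opp_store = 13 if 0 <= house < 6 else 6
--     if seeds <= 0:
--         return house
--     # one explicit sowing step brings the house into 0..13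
--     h = (house + 2) % 14 if house + 1 == opp_store else (house + 1) % 14
--     k = seeds - 1
--     if k == 0:
--         return h
--     # remaining k steps: closed form over the 13-position cycle that skips opp_store
--     r = h if h < opp_store else h - 1
--     q = (r + k) % 13
--     return q if q < opp_store else q + 1
-- ===== Notes on version B (the rewrite author's own statement) =====
-- stated objective: faster
-- what changed: Replaced the O(seeds) sowing loop by one explicit step followed by closed-form modular arithmetic over the 13 valid positions (rank, add seeds-1 mod 13, unrank).
import Mathlib
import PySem

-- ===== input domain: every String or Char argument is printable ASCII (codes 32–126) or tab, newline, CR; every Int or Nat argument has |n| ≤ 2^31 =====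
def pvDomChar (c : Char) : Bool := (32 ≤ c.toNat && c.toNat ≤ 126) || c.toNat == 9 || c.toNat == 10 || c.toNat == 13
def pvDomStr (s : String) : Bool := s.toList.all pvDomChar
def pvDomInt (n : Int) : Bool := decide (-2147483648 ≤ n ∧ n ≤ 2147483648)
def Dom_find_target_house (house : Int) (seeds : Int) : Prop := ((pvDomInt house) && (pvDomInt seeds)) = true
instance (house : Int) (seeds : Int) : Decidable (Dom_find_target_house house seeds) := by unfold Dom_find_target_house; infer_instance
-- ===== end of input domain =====

-- B replaces A's O(seeds) sowing loop by one explicit step plus closed-form modular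
-- arithmetic over the 13 valid positions (objective: faster, asymptotic).

-- ===== PORT A =====
def find_target_house (house : Int) (seeds : Int) : Int :=
  let player : Int := if 0 ≤ house ∧ house < 6 then 0 else 1
  let opp_store : Int := if player = 1 then 6 else 13
  (PySem.List.pyRange 0 seeds 1).foldl
    (fun h _ => if h + 1 = opp_store then PySem.Int.mod (h + 2) 14 else PySem.Int.mod (h + 1) 14)
    house

-- ===== PORT B =====
def find_target_house_alt (house : Int) (seeds : Int) : Int :=
  let opp_store : Int := if 0 ≤ house ∧ house < 6 then 13 else 6
  if seeds ≤ 0 then house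
  else
    let h := if house + 1 = opp_store then PySem.Int.mod (house + 2) 14
             else PySem.Int.mod (house + 1) 14
    let k := seeds - 1
    if k = 0 then h
    else
      let r := if h < opp_store then h else h - 1
      let q := PySem.Int.mod (r + k) 13
      if q < opp_store then q else q + 1

-- ===== PRECONDITION & SPEC =====
def Spec_find_target_house (house : Int) (seeds : Int) (out : Int) : Prop := out = find_target_house_alt house seeds
instance (house : Int) (seeds : Int) (out : Int) : Decidable (Spec_find_target_house house seeds out) := by unfold Spec_find_target_house; infer_instance

-- ===== CLAIM (what is proved, stated in full; the proofs are below) =====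
def Claim_equal_find_target_house : Prop := ∀ (house : Int) (seeds : Int), Dom_find_target_house house seeds → Spec_find_target_house house seeds (find_target_house house seeds)

-- ===== LEMMAS AND PROOFS =====
def pvStep (opp h : Int) : Int :=
  if h + 1 = opp then PySem.Int.mod (h + 2) 14 else PySem.Int.mod (h + 1) 14
def pvRank (opp h : Int) : Int := if h < opp then h else h - 1
def pvUnrank (opp q : Int) : Int := if q < opp then q else q + 1

theorem pv_foldl_const (f : Int → Int) (xs : List Int) (b : Int) :
    xs.foldl (fun h _ => f h) b = f^[xs.length] b := by
  induction xs generalizing b with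
  | nil => rfl
  | cons x xs ih => simp [List.foldl_cons, ih, Function.iterate_succ_apply]

theorem pvStep_bounds (opp h : Int) :
    0 ≤ pvStep opp h ∧ pvStep opp h < 14 := by
  unfold pvStep
  rw [show PySem.Int.mod (h + 2) 14 = (h + 2) % 14 from
        PySem.Int.mod_eq_emod_of_pos (by norm_num),
      show PySem.Int.mod (h + 1) 14 = (h + 1) % 14 from
        PySem.Int.mod_eq_emod_of_pos (by norm_num)]
  split <;> omega

theorem pvStep_base (opp h : Int) (hopp : opp = 6 ∨ opp = 13) (h0 : 0 ≤ h) (h1 : h < 14) :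
    pvStep opp h = pvUnrank opp (PySem.Int.mod (pvRank opp h + 1) 13) := by
  rcases hopp with rfl | rfl <;> interval_cases h <;> decide

theorem pvStep_unrank (opp q : Int) (hopp : opp = 6 ∨ opp = 13) (h0 : 0 ≤ q) (h1 : q < 13) :
    pvStep opp (pvUnrank opp q) = pvUnrank opp (PySem.Int.mod (q + 1) 13) := by
  rcases hopp with rfl | rfl <;> interval_cases q <;> decide

theorem pv_iterate (k : Nat) (opp h : Int) (hopp : opp = 6 ∨ opp = 13)
    (h0 : 0 ≤ h) (h1 : h < 14) :
    (pvStep opp)^[k + 1] h = pvUnrank opp (PySem.Int.mod (pvRank opp h + (k + 1 : Nat)) 13) := by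
  induction k with
  | zero => simpa using pvStep_base opp h hopp h0 h1
  | succ m ih =>
      rw [Function.iterate_succ_apply', ih]
      have hq0 : 0 ≤ PySem.Int.mod (pvRank opp h + (m + 1 : Nat)) 13 := by
        rw [PySem.Int.mod_eq_emod_of_pos (by norm_num)]; omega
      have hq1 : PySem.Int.mod (pvRank opp h + (m + 1 : Nat)) 13 < 13 := by
        rw [PySem.Int.mod_eq_emod_of_pos (by norm_num)]; omega
      rw [pvStep_unrank opp _ hopp hq0 hq1]
      congr 1
      rw [PySem.Int.mod_eq_emod_of_pos (by norm_num),
          PySem.Int.mod_eq_emod_of_pos (by norm_num),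
          PySem.Int.mod_eq_emod_of_pos (by norm_num)]
      push_cast
      omega

theorem pv_master (opp house seeds : Int) (hopp : opp = 6 ∨ opp = 13) :
    (PySem.List.pyRange 0 seeds 1).foldl
      (fun h _ => if h + 1 = opp then PySem.Int.mod (h + 2) 14 else PySem.Int.mod (h + 1) 14)
      house
    = (if seeds ≤ 0 then house
       else
         let h := if house + 1 = opp then PySem.Int.mod (house + 2) 14
                  else PySem.Int.mod (house + 1) 14
         let k := seeds - 1
         if k = 0 then h
         else
           let r := if h < opp then h else h - 1
           let q := PySem.Int.mod (r + k) 13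
           if q < opp then q else q + 1) := by
  have hfold :
      (PySem.List.pyRange 0 seeds 1).foldl
        (fun h _ => if h + 1 = opp then PySem.Int.mod (h + 2) 14 else PySem.Int.mod (h + 1) 14)
        house = (pvStep opp)^[seeds.toNat] house := by
    have := pv_foldl_const (pvStep opp) (PySem.List.pyRange 0 seeds 1) house
    simpa [pvStep, PySem.List.length_pyRange_one] using this
  rw [hfold]
  by_cases hs : seeds ≤ 0
  · simp [hs, Int.toNat_of_nonpos hs]
  · replace hs : 0 < seeds := by omega
    obtain ⟨m, hm⟩ : ∃ m, seeds.toNat = m + 1 := ⟨seeds.toNat - 1, by omega⟩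
    rw [hm, Function.iterate_succ_apply]
    have hstep : pvStep opp house = (if house + 1 = opp then PySem.Int.mod (house + 2) 14
                  else PySem.Int.mod (house + 1) 14) := rfl
    have hb := pvStep_bounds opp house
    rcases Nat.eq_zero_or_pos m with rfl | hmpos
    · have hseeds : seeds = 1 := by omega
      simp [hseeds, hstep]
    · obtain ⟨m', rfl⟩ : ∃ m', m = m' + 1 := ⟨m - 1, by omega⟩
      rw [pv_iterate m' opp (pvStep opp house) hopp hb.1 hb.2]
      have hk : seeds - 1 = ((m' + 1 : Nat) : Int) := by omega
      have hk0 : ¬ (seeds - 1 = 0) := by omega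
      simp only [if_neg (by omega : ¬ seeds ≤ 0), if_neg hk0]
      rw [← hstep, ← hk]
      rcases hb with ⟨hb0, hb1⟩
      set h := pvStep opp house with hh
      have hq0 : 0 ≤ PySem.Int.mod (pvRank opp h + (seeds - 1)) 13 := by
        rw [PySem.Int.mod_eq_emod_of_pos (by norm_num)]; omega
      have hq1 : PySem.Int.mod (pvRank opp h + (seeds - 1)) 13 < 13 := by
        rw [PySem.Int.mod_eq_emod_of_pos (by norm_num)]; omega
      simp [pvUnrank, pvRank]

theorem find_target_house_spec : Claim_equal_find_target_house := by
  intro house seeds _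
  unfold Spec_find_target_house find_target_house find_target_house_alt
  by_cases hc : 0 ≤ house ∧ house < 6
  · simp only [if_pos hc]
    simpa using pv_master 13 house seeds (Or.inr rfl)
  · simp only [if_neg hc]
    simpa using pv_master 6 house seeds (Or.inl rfl)
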